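-- pv_equiv track=rewrite | github.com/nasir0500/Python-Class | playfire.py | removeMatch
-- ===== SOURCE A (Python) =====
-- def removeMatch(text, fil):
--     length = len(text)
--     if length % 2 == 0:
--         for i in range(0, length, 2):
--             if text[i] == text[i + 1]:
--                 textWithoutMatch = text[0:i + 1] + fil + text[i + 1:]
--                 textWithoutMatch = removeMatch(textWithoutMatch, fil)
--                 break
--             else:
--                 textWithoutMatch = text
--     else:
--         for i in range(0, length - 1, 2):
--             if text[i] == text[i + 1]:
--                 textWithoutMatch = text[0:i + 1] + fil + text[i + 1:]
--                 textWithoutMatch = removeMatch(textWithoutMatch, fil)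
--                 break
--             else:
--                 textWithoutMatch = text
--     return textWithoutMatch
-- ===== SOURCE B (Python) =====
-- def removeMatch(text, fil):
--     out = []
--     i = 0
--     n = len(text)
--     while i + 1 < n:
--         if text[i] == text[i + 1]:
--             out.append(text[i])
--             out.append(fil)
--             if len(fil) % 2 == 0:
--                 out.append(text[i + 1])
--                 i += 2
--             else:
--                 i += 1
--         else:
--             out.append(text[i])
--             out.append(text[i + 1])
--             i += 2
--     if i < n:
--         out.append(text[i])
--     return "".join(out)
-- ===== Notes on version B (the rewrite author's own statement) =====
-- stated objective: faster
-- what changed: A repeatedly rescans the whole string from the start and rebuilds it by slicing after every single insertion, recursing once per match; B makes one left-to-right pass with a cursor that emits the filler at each even-aligned equal pair and advances by 1 or 2 to track the alignment shift, building the output once.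
-- outside the precondition, e.g. on removeMatch('aab', 'xx'): A returns 'axxab', B returns 'axxab'
import Mathlib
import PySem

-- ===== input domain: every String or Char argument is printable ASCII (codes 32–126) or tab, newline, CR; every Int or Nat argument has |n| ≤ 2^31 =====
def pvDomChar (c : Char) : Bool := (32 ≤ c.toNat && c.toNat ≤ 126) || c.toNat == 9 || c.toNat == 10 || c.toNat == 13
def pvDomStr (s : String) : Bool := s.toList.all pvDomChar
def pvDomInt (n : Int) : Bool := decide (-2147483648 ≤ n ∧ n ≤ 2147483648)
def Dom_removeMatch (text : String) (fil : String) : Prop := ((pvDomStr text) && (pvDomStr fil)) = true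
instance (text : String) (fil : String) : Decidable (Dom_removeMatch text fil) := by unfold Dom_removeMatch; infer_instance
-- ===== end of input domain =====

-- B replaces A's repeated rescan-insert-recurse by one left-to-right pass (objective: faster).

-- ===== PORT A =====
-- text[0:i+1] + fil + text[i+1:]  (0 ≤ i, i+1 ≤ len: the Python slices are exactly take/drop)
def pvIns (t : List Char) (i : Nat) (f : List Char) : List Char :=
  t.take (i + 1) ++ f ++ t.drop (i + 1)

-- the loop bound: range(0, length, 2) for even length, range(0, length - 1, 2) for odd
-- (A's two branches have textually identical bodies; only this bound differs)
def pvBnd (t : List Char) : Nat := if t.length % 2 = 0 then t.length else t.length - 1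

-- A's for-loop: first even i < bound with text[i] == text[i + 1] ('break'); none = loop falls
-- through (every iteration took the 'else: textWithoutMatch = text' arm).  For i < pvBnd t the
-- indices i and i+1 are in range; the '| _, _ => none' arm is only a totality guard.
def pvFEM (t : List Char) (b : Nat) (i : Nat) : Option Nat :=
  if i < b then
    match t[i]?, t[i + 1]? with
    | some x, some y => if x = y then some i else pvFEM t b (i + 2)
    | _, _ => none
  else none
termination_by b - i

-- A's self-recursion, fueled for totality (Python A recurses without bound on some inputs
-- outside Pre_; inside Pre_ the fuel text.length + 1 is never exhausted — the proof shows each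
-- insertion strictly decreases pvEqP ≤ length).  When the loop body never runs (length < 2)
-- Python A raises UnboundLocalError; the port returns t there, excluded by Pre_.
def pvGoA : Nat → List Char → List Char → List Char
  | 0, t, _ => t
  | n + 1, t, f =>
    match pvFEM t (pvBnd t) 0 with
    | none => t
    | some i => pvGoA n (pvIns t i f) f

def removeMatch (text : String) (fil : String) : String :=
  String.ofList (pvGoA (text.toList.length + 1) text.toList fil.toList)

-- ===== PORT B =====
-- B's while loop over the unread suffix: emit the pair, or on a match emit text[i], fil
-- (and text[i+1] when len(fil) is even), advancing by 2 resp. 1.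
def pvGoB (f : List Char) : List Char → List Char
  | a :: b :: r =>
    if a = b then
      if f.length % 2 = 0 then a :: (f ++ (b :: pvGoB f r))
      else a :: (f ++ pvGoB f (b :: r))
    else a :: b :: pvGoB f r
  | l => l
termination_by l => l.length

def removeMatch_alt (text : String) (fil : String) : String :=
  String.ofList (pvGoB fil.toList text.toList)

-- ===== PRECONDITION & SPEC =====
-- no equal pair at an even-aligned position (then A never inserts)
def pvEvenFree : List Char → Bool
  | x :: y :: r => (x != y) && pvEvenFree r
  | _ => true

-- no two equal adjacent characters
def pvNoDup : List Char → Bool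
  | x :: y :: r => (x != y) && pvNoDup (y :: r)
  | _ => true

-- no equal adjacent pair whose character is g or l
def pvHC (g l : Char) : List Char → Bool
  | x :: y :: r => (!((x == y) && ((x == g) || (x == l)))) && pvHC g l (y :: r)
  | _ => true

-- Pre_ excludes texts of length < 2 (A raises UnboundLocalError there) and, when the text has an
-- even-aligned equal pair, fillers with repeated adjacent characters or whose first or last
-- character is the character of some equal adjacent pair of the text: there A's rescans recurse
-- into the inserted filler itself and typically diverge (RecursionError); where A still returns,
-- its value comes from re-pairing inside the filler (B happens to coincide on many of them).
def Pre_removeMatch (text : String) (fil : String) : Prop :=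
  2 ≤ text.toList.length ∧
  (pvEvenFree text.toList = true ∨
    (fil.toList ≠ [] ∧ pvNoDup fil.toList = true ∧
      pvHC (fil.toList.headD ' ') (fil.toList.getLastD ' ') text.toList = true))

instance (text : String) (fil : String) : Decidable (Pre_removeMatch text fil) := by
  unfold Pre_removeMatch; infer_instance

def pvWitness_removeMatch : String × String := ("aab", "x")

def Spec_removeMatch (text : String) (fil : String) (out : String) : Prop := out = removeMatch_alt text fil
instance (text : String) (fil : String) (out : String) : Decidable (Spec_removeMatch text fil out) := by unfold Spec_removeMatch; infer_instance

-- ===== CLAIM (what is proved, stated in full; the proofs are below) =====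
def Claim_equal_removeMatch : Prop := ∀ (text : String) (fil : String), Dom_removeMatch text fil → Pre_removeMatch text fil → Spec_removeMatch text fil (removeMatch text fil)

-- ===== LEMMAS AND PROOFS =====

-- number of equal adjacent pairs: the fuel measure (each insertion removes exactly one)
def pvEqP : List Char → Nat
  | x :: y :: r => (if x = y then 1 else 0) + pvEqP (y :: r)
  | _ => 0

theorem pvEqP_le_length (t : List Char) : pvEqP t ≤ t.length := by
  match t with
  | [] => simp [pvEqP]
  | [x] => simp [pvEqP]
  | x :: y :: r =>
    have := pvEqP_le_length (y :: r)
    simp only [pvEqP, List.length_cons] at *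
    split <;> omega
termination_by t.length

theorem pvNoDup_tail (x : Char) (r : List Char) (h : pvNoDup (x :: r) = true) :
    pvNoDup r = true := by
  cases r with
  | nil => simp [pvNoDup]
  | cons y r' => simp [pvNoDup] at h ⊢; exact h.2

theorem pvHC_tail (g l x : Char) (r : List Char) (h : pvHC g l (x :: r) = true) :
    pvHC g l r = true := by
  cases r with
  | nil => simp [pvHC]
  | cons y r' => simp [pvHC] at h ⊢; exact h.2

theorem pvBnd_cons (x y : Char) (r : List Char) : pvBnd (x :: y :: r) = pvBnd r + 2 := by
  unfold pvBnd
  simp only [List.length_cons]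
  have h2 : (r.length + 1 + 1) % 2 = r.length % 2 := by omega
  rw [h2]
  split <;> omega

theorem pvFEM_zero (t : List Char) (i : Nat) : pvFEM t 0 i = none := by
  unfold pvFEM; simp

theorem pvFEM_shift (x y : Char) (r : List Char) :
    ∀ (k b i : Nat), b - i ≤ k →
      pvFEM (x :: y :: r) (b + 2) (i + 2) = Option.map (· + 2) (pvFEM r b i) := by
  intro k
  induction k with
  | zero =>
    intro b i h
    have hb : ¬ i < b := by omega
    have hb2 : ¬ i + 2 < b + 2 := by omega
    conv_lhs => rw [pvFEM]
    conv_rhs => rw [pvFEM]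
    simp [hb, hb2]
  | succ k ih =>
    intro b i h
    by_cases hib : i < b
    · have hib2 : i + 2 < b + 2 := by omega
      have e1 : (x :: y :: r)[i + 2]? = r[i]? := by simp
      have e2 : (x :: y :: r)[i + 2 + 1]? = r[i + 1]? := by
        show (x :: y :: r)[i + 3]? = r[i + 1]?
        simp [show i + 3 = (i + 1) + 2 by omega]
      conv_lhs => rw [pvFEM]
      conv_rhs => rw [pvFEM]
      simp only [hib, hib2, if_true]
      rw [e1, e2]
      cases h1 : r[i]? with
      | none => simp
      | some cx =>
        cases h2 : r[i + 1]? with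
        | none => simp
        | some cy =>
          by_cases hxy : cx = cy
          · simp [hxy]
          · simp only [hxy, if_false]
            exact ih b (i + 2) (by omega)
    · have hib2 : ¬ i + 2 < b + 2 := by omega
      conv_lhs => rw [pvFEM]
      conv_rhs => rw [pvFEM]
      simp [hib, hib2]

theorem pvFEM_cons0 (x y : Char) (r : List Char) :
    pvFEM (x :: y :: r) (pvBnd (x :: y :: r)) 0 =
      if x = y then some 0 else Option.map (· + 2) (pvFEM r (pvBnd r) 0) := by
  rw [pvBnd_cons]
  rw [pvFEM]
  have h0 : 0 < pvBnd r + 2 := by omega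
  simp only [h0, if_true]
  simp only [List.getElem?_cons_zero, List.getElem?_cons_succ]
  by_cases hxy : x = y
  · simp [hxy]
  · simp only [hxy, if_false]
    exact pvFEM_shift x y r (pvBnd r) (pvBnd r) 0 (by omega)

theorem pvFEM_small (t : List Char) (h : t.length ≤ 1) (i : Nat) :
    pvFEM t (pvBnd t) i = none := by
  have hb : pvBnd t = 0 := by
    unfold pvBnd
    match t with
    | [] => simp
    | [x] => simp
    | a :: b :: r => simp at h
  rw [hb]; exact pvFEM_zero t i

-- no even-aligned match: B's pass copies the text unchanged
theorem pvGoB_id (f : List Char) : ∀ t : List Char,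
    pvFEM t (pvBnd t) 0 = none → pvGoB f t = t := by
  intro t h
  match t with
  | [] => simp [pvGoB]
  | [x] => simp [pvGoB]
  | x :: y :: r =>
    rw [pvFEM_cons0] at h
    by_cases hxy : x = y
    · simp [hxy] at h
    · simp only [hxy, if_false, Option.map_eq_none_iff] at h
      have := pvGoB_id f r h
      simp [pvGoB, hxy, this]
termination_by t => t.length

theorem pvEvenFree_none : ∀ t : List Char,
    pvEvenFree t = true → pvFEM t (pvBnd t) 0 = none := by
  intro t h
  match t with
  | [] => exact pvFEM_small [] (by simp) 0
  | [x] => exact pvFEM_small [x] (by simp) 0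
  | x :: y :: r =>
    simp only [pvEvenFree, Bool.and_eq_true, bne_iff_ne, ne_eq] at h
    rw [pvFEM_cons0]
    simp [h.1, pvEvenFree_none r h.2]
termination_by t => t.length

-- B's pass walks through a block with no adjacent duplicates without inserting
theorem pvGoB_pass_even (f : List Char) :
    ∀ (u rest : List Char), u.length % 2 = 0 → pvNoDup u = true →
      pvGoB f (u ++ rest) = u ++ pvGoB f rest := by
  intro u rest hlen hnd
  match u with
  | [] => simp
  | [x] => simp at hlen
  | x :: y :: u' =>
    simp only [pvNoDup, Bool.and_eq_true, bne_iff_ne, ne_eq] at hnd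
    have hnd' : pvNoDup u' = true := pvNoDup_tail y u' hnd.2
    have hlen' : u'.length % 2 = 0 := by simp [List.length_cons] at hlen; omega
    have ih := pvGoB_pass_even f u' rest hlen' hnd'
    simp only [List.cons_append]
    rw [pvGoB]
    simp [hnd.1, ih]
termination_by u => u.length

theorem pvGoB_pass_odd (f : List Char) :
    ∀ (u : List Char) (a : Char) (rest : List Char), u.length % 2 = 1 → pvNoDup u = true →
      u.getLast? ≠ some a → pvGoB f (u ++ a :: rest) = u ++ a :: pvGoB f rest := by
  intro u a rest hlen hnd hlast
  match u with
  | [] => simp at hlen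
  | [x] =>
    have hxa : x ≠ a := by simpa using hlast
    simp only [List.cons_append, List.nil_append]
    rw [pvGoB]
    simp [hxa]
  | x :: y :: u' =>
    simp only [pvNoDup, Bool.and_eq_true, bne_iff_ne, ne_eq] at hnd
    have hlen' : u'.length % 2 = 1 := by simp [List.length_cons] at hlen; omega
    obtain ⟨z, u'', hz⟩ : ∃ z u'', u' = z :: u'' := by
      cases u' with
      | nil => simp at hlen'
      | cons z u'' => exact ⟨z, u'', rfl⟩
    have hlast' : u'.getLast? ≠ some a := by
      rw [hz] at hlast ⊢
      rwa [List.getLast?_cons_cons, List.getLast?_cons_cons] at hlast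
    have ih := pvGoB_pass_odd f u' a rest hlen' (pvNoDup_tail y u' hnd.2) hlast'
    simp only [List.cons_append] at ih ⊢
    rw [pvGoB]
    simp [hnd.1, ih]
termination_by u => u.length

theorem pvEqP_pass :
    ∀ (u : List Char) (a : Char) (rest : List Char), pvNoDup u = true →
      u.getLast? ≠ some a → pvEqP (u ++ a :: rest) = pvEqP (a :: rest) := by
  intro u a rest hnd hlast
  match u with
  | [] => simp
  | [x] =>
    have hxa : x ≠ a := by simpa using hlast
    simp [pvEqP, hxa]
  | x :: y :: u' =>
    simp only [pvNoDup, Bool.and_eq_true, bne_iff_ne, ne_eq] at hnd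
    have hlast' : (y :: u').getLast? ≠ some a := by rwa [List.getLast?_cons_cons] at hlast
    have ih := pvEqP_pass (y :: u') a rest hnd.2 hlast'
    simp only [List.cons_append] at ih ⊢
    simp [pvEqP, hnd.1, ih]
termination_by u => u.length

theorem pvHC_pass (g l : Char) :
    ∀ (u : List Char) (a : Char) (rest : List Char), pvNoDup u = true →
      u.getLast? ≠ some a → pvHC g l (u ++ a :: rest) = pvHC g l (a :: rest) := by
  intro u a rest hnd hlast
  match u with
  | [] => simp
  | [x] =>
    have hxa : x ≠ a := by simpa using hlast
    simp [pvHC, hxa]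
  | x :: y :: u' =>
    simp only [pvNoDup, Bool.and_eq_true, bne_iff_ne, ne_eq] at hnd
    have hlast' : (y :: u').getLast? ≠ some a := by rwa [List.getLast?_cons_cons] at hlast
    have ih := pvHC_pass g l (y :: u') a rest hnd.2 hlast'
    simp only [List.cons_append] at ih ⊢
    simp [pvHC, hnd.1, ih]
termination_by u => u.length

theorem pvGetLast?_eq_getLastD (x : Char) (xs : List Char) (d : Char) :
    (x :: xs).getLast? = some ((x :: xs).getLastD d) := by
  induction xs generalizing x with
  | nil => simp
  | cons y ys ih => rw [List.getLast?_cons_cons, List.getLastD_cons]; exact ih y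

-- one insertion step of A: B's result is unchanged, the measure drops by one, and the
-- invariant (no equal adjacent pair whose char is fil's first or last) is preserved
theorem pvStep (f0 : Char) (fs : List Char) (hnd : pvNoDup (f0 :: fs) = true) :
    ∀ (s : List Char) (i : Nat),
      pvHC f0 ((f0 :: fs).getLastD ' ') s = true →
      pvFEM s (pvBnd s) 0 = some i →
      pvGoB (f0 :: fs) (pvIns s i (f0 :: fs)) = pvGoB (f0 :: fs) s ∧
      pvEqP (pvIns s i (f0 :: fs)) + 1 = pvEqP s ∧
      pvHC f0 ((f0 :: fs).getLastD ' ') (pvIns s i (f0 :: fs)) = true := by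
  intro s i hhc hfem
  match s with
  | [] => rw [pvFEM_small [] (by simp) 0] at hfem; exact absurd hfem (by simp)
  | [x] => rw [pvFEM_small [x] (by simp) 0] at hfem; exact absurd hfem (by simp)
  | a :: b :: r =>
    have hflast : (f0 :: fs).getLast? = some ((f0 :: fs).getLastD ' ') :=
      pvGetLast?_eq_getLastD f0 fs ' '
    rw [pvFEM_cons0] at hfem
    by_cases hab : a = b
    · -- match at position 0
      simp only [hab, if_true, Option.some.injEq] at hfem
      subst hfem
      subst hab
      simp only [pvHC, Bool.and_eq_true, Bool.not_eq_true', Bool.and_eq_false_iff,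
        Bool.or_eq_false_iff, beq_eq_false_iff_ne, ne_eq] at hhc
      have haf0 : a ≠ f0 := by
        rcases hhc.1 with h | h
        · exact absurd trivial h
        · exact h.1
      have hal : a ≠ (f0 :: fs).getLastD ' ' := by
        rcases hhc.1 with h | h
        · exact absurd trivial h
        · exact h.2
      have hhc2 : pvHC f0 ((f0 :: fs).getLastD ' ') (a :: r) = true := by
        have := hhc.2
        cases r with
        | nil => simp [pvHC]
        | cons z zs =>
          simp only [pvHC, Bool.and_eq_true] at this ⊢
          exact this
      have hins : pvIns (a :: a :: r) 0 (f0 :: fs) = a :: ((f0 :: fs) ++ a :: r) := by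
        simp [pvIns]
      have hlast_ne : (f0 :: fs).getLast? ≠ some a := by
        rw [hflast]; intro h; exact hal (by injection h with h; exact h.symm)
      refine ⟨?_, ?_, ?_⟩
      · -- B is unchanged by the insertion
        rw [hins]
        by_cases hpar : (f0 :: fs).length % 2 = 0
        · -- even-length filler: fs has odd length, its last char pairs with the second a
          have hfs : fs.length % 2 = 1 := by simp [List.length_cons] at hpar; omega
          have hlast_fs : fs.getLast? ≠ some a := by
            cases fs with
            | nil => simp at hfs
            | cons z zs =>
              rw [List.getLast?_cons_cons] at hflast
              rw [hflast]; intro h; exact hal (by injection h with h; exact h.symm)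
          have hpass := pvGoB_pass_odd (f0 :: fs) fs a r hfs (pvNoDup_tail f0 fs hnd) hlast_fs
          have lhs : pvGoB (f0 :: fs) (a :: ((f0 :: fs) ++ a :: r)) =
              a :: f0 :: (fs ++ a :: pvGoB (f0 :: fs) r) := by
            simp only [List.cons_append]
            rw [pvGoB, if_neg haf0, hpass]
          have rhs : pvGoB (f0 :: fs) (a :: a :: r) =
              a :: ((f0 :: fs) ++ (a :: pvGoB (f0 :: fs) r)) := by
            rw [pvGoB, if_pos rfl, if_pos hpar]
          rw [lhs, rhs]; simp
        · -- odd-length filler: fs has even length, the pass realigns after it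
          have hfs : fs.length % 2 = 0 := by simp [List.length_cons] at hpar; omega
          have hpass := pvGoB_pass_even (f0 :: fs) fs (a :: r) hfs (pvNoDup_tail f0 fs hnd)
          have lhs : pvGoB (f0 :: fs) (a :: ((f0 :: fs) ++ a :: r)) =
              a :: f0 :: (fs ++ pvGoB (f0 :: fs) (a :: r)) := by
            simp only [List.cons_append]
            rw [pvGoB, if_neg haf0, hpass]
          have rhs : pvGoB (f0 :: fs) (a :: a :: r) =
              a :: ((f0 :: fs) ++ pvGoB (f0 :: fs) (a :: r)) := by
            rw [pvGoB, if_pos rfl, if_neg hpar]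
          rw [lhs, rhs]; simp
      · -- the measure drops by exactly one
        rw [hins]
        have hpass := pvEqP_pass (f0 :: fs) a r hnd hlast_ne
        have heq : pvEqP (a :: ((f0 :: fs) ++ a :: r)) = pvEqP (a :: r) := by
          simp only [List.cons_append]
          rw [pvEqP, if_neg haf0]
          rw [show f0 :: (fs ++ a :: r) = (f0 :: fs) ++ a :: r from rfl, hpass]
          omega
        rw [heq]
        rw [show pvEqP (a :: a :: r) = 1 + pvEqP (a :: r) by simp [pvEqP]]
        omega
      · -- the invariant is preserved
        rw [hins]
        have hpass := pvHC_pass f0 ((f0 :: fs).getLastD ' ') (f0 :: fs) a r hnd hlast_ne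
        simp only [List.cons_append]
        rw [pvHC, Bool.and_eq_true]
        refine ⟨by simp [haf0], ?_⟩
        rw [show f0 :: (fs ++ a :: r) = (f0 :: fs) ++ a :: r from rfl, hpass]
        exact hhc2
    · -- no match at position 0: recurse on r
      simp only [hab, if_false] at hfem
      rcases Option.map_eq_some_iff.mp hfem with ⟨j, hj, hij⟩
      subst hij
      have hr2 : 2 ≤ r.length := by
        by_contra h
        rw [pvFEM_small r (by omega) 0] at hj
        exact absurd hj (by simp)
      obtain ⟨z, rr, hz⟩ : ∃ z rr, r = z :: rr := by
        cases r with
        | nil => simp at hr2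
        | cons z rr => exact ⟨z, rr, rfl⟩
      have hhcr : pvHC f0 ((f0 :: fs).getLastD ' ') r = true :=
        pvHC_tail _ _ b r (pvHC_tail _ _ a (b :: r) hhc)
      have hins : pvIns (a :: b :: r) (j + 2) (f0 :: fs) = a :: b :: pvIns r j (f0 :: fs) := by
        simp [pvIns, show j + 2 + 1 = (j + 1) + 1 + 1 by omega, List.take_succ_cons,
          List.drop_succ_cons]
      have hhead : pvIns (z :: rr) j (f0 :: fs) =
          z :: (rr.take j ++ f0 :: (fs ++ rr.drop j)) := by
        simp [pvIns, List.take_succ_cons, List.drop_succ_cons]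
      have ih := pvStep f0 fs hnd r j hhcr hj
      rw [hz] at ih hhc
      rw [hhead] at ih
      refine ⟨?_, ?_, ?_⟩
      · rw [hins, hz, hhead]
        conv_lhs => rw [pvGoB]
        conv_rhs => rw [pvGoB]
        rw [if_neg hab, if_neg hab, ih.1]
      · rw [hins, hz, hhead]
        have h2 := ih.2.1
        simp only [pvEqP]
        split_ifs <;> omega
      · rw [hins, hz, hhead]
        simp only [pvHC, Bool.and_eq_true] at hhc ⊢
        exact ⟨hhc.1, hhc.2.1, ih.2.2⟩
termination_by s => s.length

theorem pvMain (f0 : Char) (fs : List Char) (hnd : pvNoDup (f0 :: fs) = true) :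
    ∀ (n : Nat) (s : List Char), pvEqP s < n →
      pvHC f0 ((f0 :: fs).getLastD ' ') s = true →
      pvGoA n s (f0 :: fs) = pvGoB (f0 :: fs) s := by
  intro n
  induction n with
  | zero => intro s h; omega
  | succ n ih =>
    intro s h hhc
    rw [pvGoA]
    cases hfem : pvFEM s (pvBnd s) 0 with
    | none =>
      exact (pvGoB_id _ s hfem).symm
    | some i =>
      obtain ⟨h1, h2, h3⟩ := pvStep f0 fs hnd s i hhc hfem
      exact (ih (pvIns s i (f0 :: fs)) (by omega) h3).trans h1

-- ===== VERDICT (by name: the statement is the Claim_ definition above) =====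
theorem removeMatch_spec : Claim_equal_removeMatch := by
  unfold Claim_equal_removeMatch
  intro text fil _ hpre
  unfold Spec_removeMatch removeMatch removeMatch_alt
  rcases hpre with ⟨hlen, hcase | ⟨hne, hnd, hhc⟩⟩
  · have hnone := pvEvenFree_none text.toList hcase
    have ha : pvGoA (text.toList.length + 1) text.toList fil.toList = text.toList := by
      rw [pvGoA, hnone]

    rw [ha, pvGoB_id _ _ hnone]
  · obtain ⟨f0, fs, hf⟩ : ∃ f0 fs, fil.toList = f0 :: fs := by
      cases h : fil.toList with
      | nil => exact absurd h hne
      | cons a l => exact ⟨a, l, rfl⟩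
    rw [hf] at hnd hhc ⊢
    simp only [List.headD_cons] at hhc
    have := pvMain f0 fs hnd (text.toList.length + 1) text.toList
      (by have := pvEqP_le_length text.toList; omega) hhc
    rw [this]
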